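-- pv_equiv track=rewrite | github.com/CSID-DGU/2023-1-CECD3-Sugar-4 | app/Model/SampleProcess.py | convert_ocr_result_to_bbox_corrected
-- ===== SOURCE A (Python) =====
-- def convert_ocr_result_to_bbox_corrected(ocr_data):
--     """ Convert OCR data in polygon format to bbox format (x, y, width, height) correctly. """
--     bboxes = []
--     for polygon in ocr_data:
--         x_coords = [point[0] for point in polygon]
--         y_coords = [point[1] for point in polygon]
--         x_min = min(x_coords)
--         y_min = min(y_coords)
--         x_max = max(x_coords)
--         y_max = max(y_coords)
--         bbox = [x_min, y_min, x_max - x_min, y_max - y_min]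
--         bboxes.append(bbox)
--     return bboxes
-- ===== SOURCE B (Python) =====
-- def convert_ocr_result_to_bbox_corrected(ocr_data):
--     """Single fused pass per polygon maintaining four running extrema."""
--     bboxes = []
--     for polygon in ocr_data:
--         first = polygon[0]
--         x_min = x_max = first[0]
--         y_min = y_max = first[1]
--         for point in polygon[1:]:
--             x = point[0]
--             y = point[1]
--             if x < x_min:
--                 x_min = x
--             if x > x_max:
--                 x_max = x
--             if y < y_min:
--                 y_min = y
--             if y > y_max:
--                 y_max = y
--         bboxes.append([x_min, y_min, x_max - x_min, y_max - y_min])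
--     return bboxes
-- ===== Notes on version B (the rewrite author's own statement) =====
-- stated objective: alternative
-- what changed: Replaces the two per-polygon coordinate-list comprehensions plus four min/max reduction passes with one fused loop seeded from the first point that maintains four running extrema scalars.
import Mathlib
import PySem

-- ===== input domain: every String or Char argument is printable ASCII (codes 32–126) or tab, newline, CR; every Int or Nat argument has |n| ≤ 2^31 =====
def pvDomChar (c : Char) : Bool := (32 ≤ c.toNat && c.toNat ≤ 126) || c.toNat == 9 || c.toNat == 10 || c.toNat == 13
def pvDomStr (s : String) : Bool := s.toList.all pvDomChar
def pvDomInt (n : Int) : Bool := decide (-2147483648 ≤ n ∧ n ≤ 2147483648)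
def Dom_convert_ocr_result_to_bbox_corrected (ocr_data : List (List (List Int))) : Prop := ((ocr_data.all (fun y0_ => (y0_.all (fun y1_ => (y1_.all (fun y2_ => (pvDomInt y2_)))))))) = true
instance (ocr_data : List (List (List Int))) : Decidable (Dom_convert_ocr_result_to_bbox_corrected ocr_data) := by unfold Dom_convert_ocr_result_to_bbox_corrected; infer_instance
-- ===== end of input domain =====

-- B fuses the two coordinate-list comprehensions and the four min/max reduction
-- passes of A into one loop per polygon maintaining four running extrema (objective: alternative).

-- ===== PORT A =====
def convert_ocr_result_to_bbox_corrected (ocr_data : List (List (List Int))) : List (List Int) :=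
  ocr_data.foldl (fun bboxes polygon =>
    let x_coords := polygon.map (fun point => (PySem.List.pyGet? point 0).getD 0)
    let y_coords := polygon.map (fun point => (PySem.List.pyGet? point 1).getD 0)
    let x_min := (PySem.List.min? x_coords (fun v => v)).getD 0
    let y_min := (PySem.List.min? y_coords (fun v => v)).getD 0
    let x_max := (PySem.List.max? x_coords (fun v => v)).getD 0
    let y_max := (PySem.List.max? y_coords (fun v => v)).getD 0
    bboxes ++ [[x_min, y_min, x_max - x_min, y_max - y_min]]) []

-- ===== PORT B =====
def convert_ocr_result_to_bbox_corrected_alt (ocr_data : List (List (List Int))) : List (List Int) :=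
  ocr_data.foldl (fun bboxes polygon =>
    match polygon with
    | [] => bboxes  -- unreachable under Pre_: Python B raises IndexError on polygon[0]
    | first :: rest =>
      let x0 := (PySem.List.pyGet? first 0).getD 0
      let y0 := (PySem.List.pyGet? first 1).getD 0
      let s := rest.foldl (fun (st : Int × Int × Int × Int) point =>
          let x := (PySem.List.pyGet? point 0).getD 0
          let y := (PySem.List.pyGet? point 1).getD 0
          (if x < st.1 then x else st.1, if x > st.2.1 then x else st.2.1,
           if y < st.2.2.1 then y else st.2.2.1, if y > st.2.2.2 then y else st.2.2.2))
        (x0, x0, y0, y0)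
      bboxes ++ [[s.1, s.2.2.1, s.2.1 - s.1, s.2.2.2 - s.2.2.1]]) []

-- ===== PRECONDITION & SPEC =====
-- Pre_ excludes exactly the inputs where the Python A raises: an empty polygon
-- (min() of an empty sequence, ValueError) or a point with fewer than 2 coordinates (IndexError).
def Pre_convert_ocr_result_to_bbox_corrected (ocr_data : List (List (List Int))) : Prop :=
  ∀ polygon ∈ ocr_data, polygon ≠ [] ∧ ∀ point ∈ polygon, 2 ≤ point.length
instance (ocr_data : List (List (List Int))) : Decidable (Pre_convert_ocr_result_to_bbox_corrected ocr_data) := by unfold Pre_convert_ocr_result_to_bbox_corrected; infer_instance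

def pvWitness_convert_ocr_result_to_bbox_corrected : List (List (List Int)) :=
  [[[1, 2], [5, 0], [3, 7]], [[0, 0], [2, 2]]]

def Spec_convert_ocr_result_to_bbox_corrected (ocr_data : List (List (List Int))) (out : List (List Int)) : Prop := out = convert_ocr_result_to_bbox_corrected_alt ocr_data
instance (ocr_data : List (List (List Int))) (out : List (List Int)) : Decidable (Spec_convert_ocr_result_to_bbox_corrected ocr_data out) := by unfold Spec_convert_ocr_result_to_bbox_corrected; infer_instance

-- ===== CLAIM (what is proved, stated in full; the proofs are below) =====
def Claim_equal_convert_ocr_result_to_bbox_corrected : Prop := ∀ (ocr_data : List (List (List Int))), Dom_convert_ocr_result_to_bbox_corrected ocr_data → Pre_convert_ocr_result_to_bbox_corrected ocr_data → Spec_convert_ocr_result_to_bbox_corrected ocr_data (convert_ocr_result_to_bbox_corrected ocr_data)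

-- ===== LEMMAS AND PROOFS =====

theorem pv_if_lt_min (x m : Int) : (if x < m then x else m) = min m x := by
  split <;> omega

theorem pv_if_gt_max (x m : Int) : (if x > m then x else m) = max m x := by
  split <;> omega

-- the fused quadruple fold of B computes the four independent running min/max folds
theorem pv_quad_fold (rest : List (List Int)) :
    ∀ (a b c d : Int),
    rest.foldl (fun (st : Int × Int × Int × Int) point =>
        let x := (PySem.List.pyGet? point 0).getD 0
        let y := (PySem.List.pyGet? point 1).getD 0
        (if x < st.1 then x else st.1, if x > st.2.1 then x else st.2.1,
         if y < st.2.2.1 then y else st.2.2.1, if y > st.2.2.2 then y else st.2.2.2))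
      (a, b, c, d)
    = (rest.foldl (fun m p => min m ((PySem.List.pyGet? p 0).getD 0)) a,
       rest.foldl (fun m p => max m ((PySem.List.pyGet? p 0).getD 0)) b,
       rest.foldl (fun m p => min m ((PySem.List.pyGet? p 1).getD 0)) c,
       rest.foldl (fun m p => max m ((PySem.List.pyGet? p 1).getD 0)) d) := by
  induction rest with
  | nil => intro a b c d; rfl
  | cons p t ih =>
    intro a b c d
    simp only [List.foldl_cons]
    rw [show (if ((PySem.List.pyGet? p 0).getD 0) < a then ((PySem.List.pyGet? p 0).getD 0) else a)
          = min a ((PySem.List.pyGet? p 0).getD 0) from pv_if_lt_min _ _]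
    rw [pv_if_gt_max, pv_if_lt_min, pv_if_gt_max]
    exact ih _ _ _ _

theorem pv_min_eq (f : List Int → Int) (first : List Int) (rest : List (List Int)) :
    (PySem.List.min? ((first :: rest).map f) (fun v => v)).getD 0
      = rest.foldl (fun m p => min m (f p)) (f first) := by
  simp [PySem.List.min?_id_cons, List.foldl_map]

theorem pv_max_eq (f : List Int → Int) (first : List Int) (rest : List (List Int)) :
    (PySem.List.max? ((first :: rest).map f) (fun v => v)).getD 0
      = rest.foldl (fun m p => max m (f p)) (f first) := by
  simp [PySem.List.max?_id_cons, List.foldl_map]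

theorem pv_main (l : List (List (List Int))) :
    ∀ acc : List (List Int), (∀ p ∈ l, p ≠ []) →
    l.foldl (fun bboxes polygon =>
      let x_coords := polygon.map (fun point => (PySem.List.pyGet? point 0).getD 0)
      let y_coords := polygon.map (fun point => (PySem.List.pyGet? point 1).getD 0)
      let x_min := (PySem.List.min? x_coords (fun v => v)).getD 0
      let y_min := (PySem.List.min? y_coords (fun v => v)).getD 0
      let x_max := (PySem.List.max? x_coords (fun v => v)).getD 0
      let y_max := (PySem.List.max? y_coords (fun v => v)).getD 0
      bboxes ++ [[x_min, y_min, x_max - x_min, y_max - y_min]]) acc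
    = l.foldl (fun bboxes polygon =>
      match polygon with
      | [] => bboxes
      | first :: rest =>
        let x0 := (PySem.List.pyGet? first 0).getD 0
        let y0 := (PySem.List.pyGet? first 1).getD 0
        let s := rest.foldl (fun (st : Int × Int × Int × Int) point =>
            let x := (PySem.List.pyGet? point 0).getD 0
            let y := (PySem.List.pyGet? point 1).getD 0
            (if x < st.1 then x else st.1, if x > st.2.1 then x else st.2.1,
             if y < st.2.2.1 then y else st.2.2.1, if y > st.2.2.2 then y else st.2.2.2))
          (x0, x0, y0, y0)
        bboxes ++ [[s.1, s.2.2.1, s.2.1 - s.1, s.2.2.2 - s.2.2.1]]) acc := by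
  induction l with
  | nil => intro acc _; rfl
  | cons p t ih =>
    intro acc h
    obtain ⟨first, rest, rfl⟩ : ∃ a b, p = a :: b := by
      cases p with
      | nil => exact absurd rfl (h [] (List.mem_cons_self ..))
      | cons a b => exact ⟨a, b, rfl⟩
    simp only [List.foldl_cons]
    rw [pv_quad_fold]
    simp only [pv_min_eq, pv_max_eq]
    exact ih _ (fun q hq => h q (List.mem_cons_of_mem _ hq))

-- ===== VERDICT (by name: the statement is the Claim_ definition above) =====
theorem convert_ocr_result_to_bbox_corrected_spec : Claim_equal_convert_ocr_result_to_bbox_corrected := by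
  intro ocr_data _ hpre
  unfold Spec_convert_ocr_result_to_bbox_corrected
  unfold convert_ocr_result_to_bbox_corrected convert_ocr_result_to_bbox_corrected_alt
  exact pv_main ocr_data [] (fun p hp => (hpre p hp).1)
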